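-- pv_equiv track=rewrite | github.com/hridaypradhan/tabrl-sft-evaluation | scripts/prepare_rotowire.py | parse_table_block
-- ===== SOURCE A (Python) =====
-- def parse_table_block(block_text: str):
--     """
--     Parse one 'test.data' block into:
--       { "teams": [rows...], "players": [rows...] }
--     Using '<NEWLINE>' markers and '|' separators, as in your sample.
--     """
--     lines = [ln.strip() for ln in block_text.split("<NEWLINE>") if ln.strip()]
--     out = {"teams": [], "players": []}
--     section = None  # "team" or "player"
--     headers = None
--
--     def parse_row_fields(header_cells, row_cells):
--         return {
--             header_cells[i].strip(): (row_cells[i].strip() if i < len(row_cells) else "")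
--             for i in range(len(header_cells))
--         }
--
--     i = 0    # index over "lines" expressed in <NEWLINE>-logical rows
--     while i < len(lines):
--         ln = lines[i]
--         if ln.startswith("Team:"):
--             section = "team"
--             headers = None
--             i += 1
--             continue
--         if ln.startswith("Player:"):
--             section = "player"
--             headers = None
--             i += 1
--             continue
--
--         cells = [c.strip() for c in ln.split("|")]
--         if cells and cells[0] == "":
--             cells = cells[1:]
--         if cells and cells[-1] == "":
--             cells = cells[:-1]
--
--         if section == "team":
--             if headers is None:
--                 headers = cells
--                 if headers and headers[0] == "":
--                     headers[0] = "Team"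
--                 else:
--                     headers = ["Team"] + headers
--             else:
--                 if cells and cells[0] != "":
--                     if len(cells) < len(headers):
--                         cells = cells + [""] * (len(headers) - len(cells))
--                     out["teams"].append(parse_row_fields(headers, cells))
--         elif section == "player":
--             if headers is None:
--                 headers = cells
--                 if headers and headers[0] == "":
--                     headers[0] = "Player"
--                 else:
--                     headers = ["Player"] + headers
--             else:
--                 if cells and cells[0] != "":
--                     if len(cells) < len(headers):
--                         cells = cells + [""] * (len(headers) - len(cells))
--                     out["players"].append(parse_row_fields(headers, cells))
--
--         i += 1
--
--     return out
-- ===== SOURCE B (Python) =====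
-- def parse_table_block(block_text: str):
--     """Two-phase parse: split cleaned lines into marker-tagged sections, then
--     build each section's row dicts from its first row taken as headers."""
--     lines = [ln.strip() for ln in block_text.split("<NEWLINE>") if ln.strip()]
--
--     # Phase 1: group lines into sections; lines before the first marker are dropped.
--     groups = []
--     for ln in lines:
--         if ln.startswith("Team:"):
--             groups.append(("team", []))
--         elif ln.startswith("Player:"):
--             groups.append(("player", []))
--         elif groups:
--             groups[-1][1].append(ln)
--
--     def split_cells(ln):
--         cells = [c.strip() for c in ln.split("|")]
--         if cells and cells[0] == "":
--             cells = cells[1:]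
--         if cells and cells[-1] == "":
--             cells = cells[:-1]
--         return cells
--
--     # Phase 2: per section, first data row gives the headers, the rest give rows.
--     out = {"teams": [], "players": []}
--     for tag, rows in groups:
--         if not rows:
--             continue
--         label = "Team" if tag == "team" else "Player"
--         first = split_cells(rows[0])
--         if first and first[0] == "":
--             headers = [label] + first[1:]
--         else:
--             headers = [label] + first
--         dest = out["teams"] if tag == "team" else out["players"]
--         for r in rows[1:]:
--             cells = split_cells(r)
--             if not cells or cells[0] == "":
--                 continue
--             if len(cells) < len(headers):
--                 cells = cells + [""] * (len(headers) - len(cells))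
--             dest.append({h.strip(): v.strip() for h, v in zip(headers, cells)})
--     return out
-- ===== Notes on version B (the rewrite author's own statement) =====
-- stated objective: alternative
-- what changed: B replaces A's single stateful while-loop (section/headers flags threaded across all lines) by a two-phase decomposition: first split the cleaned lines into marker-tagged sections, then independently turn each section's first row into headers and its remaining rows into dicts (zip of headers with padded cells).
import Mathlib
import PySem

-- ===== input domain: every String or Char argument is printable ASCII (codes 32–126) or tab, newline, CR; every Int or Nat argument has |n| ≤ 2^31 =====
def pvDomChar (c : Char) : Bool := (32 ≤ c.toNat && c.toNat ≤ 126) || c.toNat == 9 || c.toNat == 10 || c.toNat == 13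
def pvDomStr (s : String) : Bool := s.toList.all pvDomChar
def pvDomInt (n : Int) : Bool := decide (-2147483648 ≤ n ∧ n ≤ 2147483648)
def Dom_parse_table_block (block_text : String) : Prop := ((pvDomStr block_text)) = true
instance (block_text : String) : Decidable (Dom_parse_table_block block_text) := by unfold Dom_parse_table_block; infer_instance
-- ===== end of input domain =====

-- B re-implements A's single stateful scan as two phases (split lines into marker-tagged
-- sections, then build each section's row dicts from its first row as headers); same
-- results, objective: alternative decomposition (no speed claim).

-- ===== PORT A =====
-- lines = [ln.strip() for ln in block_text.split("<NEWLINE>") if ln.strip()]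
-- (split? is `some` whenever the separator is nonempty, as it is for every split here)
def pvLinesA (block_text : String) : List String :=
  (((PySem.Str.split? block_text "<NEWLINE>").getD []).map PySem.Str.strip).filter (fun ln => ln ≠ "")

-- cells = [c.strip() for c in ln.split("|")]; drop leading "" cell; drop trailing "" cell
def pvCellsA (ln : String) : List String :=
  let cells := ((PySem.Str.split? ln "|").getD []).map PySem.Str.strip
  let cells := if cells ≠ [] ∧ cells.head? = some "" then cells.drop 1 else cells
  if cells ≠ [] ∧ cells.getLast? = some "" then cells.dropLast else cells

-- parse_row_fields: dict comprehension over range(len(header_cells))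
def pvRowFieldsA (header_cells row_cells : List String) : List (String × String) :=
  ((PySem.List.pyRange 0 (header_cells.length : Int) 1).foldl
    (fun d i => d.insert (PySem.Str.strip (PySem.List.pyGetD header_cells i ""))
      (if i < (row_cells.length : Int) then PySem.Str.strip (PySem.List.pyGetD row_cells i "") else ""))
    PySem.Dict.empty).items

-- the while-loop: state = (section, headers, out["teams"], out["players"])
def pvLoopA : List String → Option String → Option (List String) →
    List (List (String × String)) → List (List (String × String)) →
    List (List (String × String)) × List (List (String × String))
  | [], _, _, t, p => (t, p)
  | ln :: rest, sect, headers, t, p =>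
    if PySem.Str.startswith ln "Team:" then pvLoopA rest (some "team") none t p
    else if PySem.Str.startswith ln "Player:" then pvLoopA rest (some "player") none t p
    else
      let cells := pvCellsA ln
      if sect = some "team" then
        match headers with
        | none =>
            pvLoopA rest sect
              (some (if cells ≠ [] ∧ cells.head? = some "" then "Team" :: cells.drop 1
                     else "Team" :: cells)) t p
        | some h =>
            if cells ≠ [] ∧ cells.head? ≠ some "" then
              pvLoopA rest sect (some h)
                (t ++ [pvRowFieldsA h
                  (if cells.length < h.length then cells ++ List.replicate (h.length - cells.length) "" else cells)]) p
            else pvLoopA rest sect (some h) t p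
      else if sect = some "player" then
        match headers with
        | none =>
            pvLoopA rest sect
              (some (if cells ≠ [] ∧ cells.head? = some "" then "Player" :: cells.drop 1
                     else "Player" :: cells)) t p
        | some h =>
            if cells ≠ [] ∧ cells.head? ≠ some "" then
              pvLoopA rest sect (some h) t
                (p ++ [pvRowFieldsA h
                  (if cells.length < h.length then cells ++ List.replicate (h.length - cells.length) "" else cells)])
            else pvLoopA rest sect (some h) t p
      else pvLoopA rest sect headers t p

def parse_table_block (block_text : String) : List (String × List (List (String × String))) :=
  let lines := pvLinesA block_text
  let r := pvLoopA lines none none [] []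
  [("teams", r.1), ("players", r.2)]

-- ===== PORT B =====
def pvLinesB (block_text : String) : List String :=
  (((PySem.Str.split? block_text "<NEWLINE>").getD []).map PySem.Str.strip).filter (fun ln => ln ≠ "")

def pvCellsB (ln : String) : List String :=
  let cells := ((PySem.Str.split? ln "|").getD []).map PySem.Str.strip
  let cells := if cells ≠ [] ∧ cells.head? = some "" then cells.drop 1 else cells
  if cells ≠ [] ∧ cells.getLast? = some "" then cells.dropLast else cells

-- phase 1 step: markers open a new group, other lines join the last group (if any)
def pvGroupStep (gs : List (String × List String)) (ln : String) : List (String × List String) :=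
  if PySem.Str.startswith ln "Team:" then gs ++ [("team", ([] : List String))]
  else if PySem.Str.startswith ln "Player:" then gs ++ [("player", [])]
  else match gs.getLast? with
    | some g => gs.dropLast ++ [(g.1, g.2 ++ [ln])]
    | none => gs

-- {h.strip(): v.strip() for h, v in zip(headers, cells)}
def pvRowB (headers cells : List String) : List (String × String) :=
  ((headers.zip cells).foldl
    (fun d hv => d.insert (PySem.Str.strip hv.1) (PySem.Str.strip hv.2)) PySem.Dict.empty).items

-- body of the row loop of phase 2 ('continue' on empty first cell; pad; append the dict)
def pvRowStepB (headers : List String) (acc : List (List (String × String))) (r : String) :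
    List (List (String × String)) :=
  let cells := pvCellsB r
  if cells = [] ∨ cells.head? = some "" then acc
  else
    acc ++ [pvRowB headers
      (if cells.length < headers.length then cells ++ List.replicate (headers.length - cells.length) "" else cells)]

-- phase 2: one section
def pvProcessGroup (acc : List (List (String × String)) × List (List (String × String)))
    (g : String × List String) :
    List (List (String × String)) × List (List (String × String)) :=
  match g.2 with
  | [] => acc
  | r :: rs =>
    let label := if g.1 = "team" then "Team" else "Player"
    let first := pvCellsB r
    let headers := if first ≠ [] ∧ first.head? = some "" then label :: first.drop 1 else label :: first
    if g.1 = "team" then (rs.foldl (pvRowStepB headers) acc.1, acc.2)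
    else (acc.1, rs.foldl (pvRowStepB headers) acc.2)

def parse_table_block_alt (block_text : String) : List (String × List (List (String × String))) :=
  let lines := pvLinesB block_text
  let groups := lines.foldl pvGroupStep []
  let r := groups.foldl pvProcessGroup ([], [])
  [("teams", r.1), ("players", r.2)]

-- ===== PRECONDITION & SPEC =====
def Spec_parse_table_block (block_text : String) (out : List (String × List (List (String × String)))) : Prop := out = parse_table_block_alt block_text
instance (block_text : String) (out : List (String × List (List (String × String)))) : Decidable (Spec_parse_table_block block_text out) := by unfold Spec_parse_table_block; infer_instance

-- ===== CLAIM (what is proved, stated in full; the proofs are below) =====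
def Claim_equal_parse_table_block : Prop := ∀ (block_text : String), Dom_parse_table_block block_text → Spec_parse_table_block block_text (parse_table_block block_text)

-- ===== LEMMAS AND PROOFS =====

-- proof-side: phase 1 with an explicit open group (tag, rows)
def pvSg : List String → String → List String → List (String × List String)
  | [], tag, rows => [(tag, rows)]
  | l :: ls, tag, rows =>
    if PySem.Str.startswith l "Team:" then (tag, rows) :: pvSg ls "team" []
    else if PySem.Str.startswith l "Player:" then (tag, rows) :: pvSg ls "player" []
    else pvSg ls tag (rows ++ [l])

def pvFix (label : String) (first : List String) : List String :=
  if first ≠ [] ∧ first.head? = some "" then label :: first.drop 1 else label :: first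

def pvHdr (label : String) (rows : List String) : Option (List String) :=
  match rows with | [] => none | r :: _ => some (pvFix label (pvCellsB r))

def pvDest (label : String) (rows : List String) (dest : List (List (String × String))) :
    List (List (String × String)) :=
  match rows with | [] => dest | r :: rs => rs.foldl (pvRowStepB (pvFix label (pvCellsB r))) dest

lemma pvCellsAB : pvCellsA = pvCellsB := rfl

lemma pvRowAux (n : Nat) : ∀ (k : Nat) (h c : List String) (d : PySem.Dict String String),
    h.length ≤ c.length → h.length = k + n →
    (PySem.List.pyRange (k : Int) (h.length : Int) 1).foldl
      (fun d i => d.insert (PySem.Str.strip (PySem.List.pyGetD h i ""))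
        (if i < (c.length : Int) then PySem.Str.strip (PySem.List.pyGetD c i "") else "")) d
    = ((h.drop k).zip (c.drop k)).foldl
        (fun d hv => d.insert (PySem.Str.strip hv.1) (PySem.Str.strip hv.2)) d := by
  induction n with
  | zero =>
    intro k h c d hlen hk
    rw [PySem.List.pyRange_one_eq_nil (by exact_mod_cast Nat.le_of_eq hk), List.foldl_nil,
      List.drop_of_length_le (by omega)]
    simp
  | succ n ih =>
    intro k h c d hlen hk
    have hkl : k < h.length := by omega
    have hkc : k < c.length := lt_of_lt_of_le hkl hlen
    have hc : (k : Int) < (c.length : Int) := by exact_mod_cast hkc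
    rw [PySem.List.pyRange_one_cons (by exact_mod_cast hkl)]
    simp only [List.foldl_cons]
    rw [if_pos hc, PySem.List.pyGetD_natCast, PySem.List.pyGetD_natCast,
      List.getD_eq_getElem h "" hkl, List.getD_eq_getElem c "" hkc,
      List.drop_eq_getElem_cons hkl, List.drop_eq_getElem_cons hkc,
      List.zip_cons_cons, List.foldl_cons]
    have hcast : ((k : Int) + 1) = ((k + 1 : Nat) : Int) := by push_cast; ring
    rw [hcast]
    exact ih (k + 1) h c _ hlen (by omega)

lemma pvRowEq (h c : List String) (hlen : h.length ≤ c.length) :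
    pvRowFieldsA h c = pvRowB h c := by
  unfold pvRowFieldsA pvRowB
  have := pvRowAux h.length 0 h c PySem.Dict.empty hlen (by omega)
  simp only [Nat.cast_zero, List.drop_zero] at this
  rw [this]

lemma pvStepEq (h : List String) (acc : List (List (String × String))) (ln : String) :
    (if pvCellsA ln ≠ [] ∧ (pvCellsA ln).head? ≠ some "" then
      acc ++ [pvRowFieldsA h
        (if (pvCellsA ln).length < h.length then
          pvCellsA ln ++ List.replicate (h.length - (pvCellsA ln).length) "" else pvCellsA ln)]
     else acc) = pvRowStepB h acc ln := by
  rw [pvCellsAB]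
  unfold pvRowStepB
  by_cases h1 : pvCellsB ln = [] ∨ (pvCellsB ln).head? = some ""
  · rw [if_pos h1, if_neg (by tauto)]
  · rw [if_neg h1, if_pos (by tauto)]
    have hlen : h.length ≤
        (if (pvCellsB ln).length < h.length then
          pvCellsB ln ++ List.replicate (h.length - (pvCellsB ln).length) "" else pvCellsB ln).length := by
      split_ifs with h2
      · simp only [List.length_append, List.length_replicate]
        omega
      · omega
    rw [pvRowEq h _ hlen]

lemma pvGroupStepConcat (gs : List (String × List String)) (tag : String) (rows : List String)
    (l : String) (hT : PySem.Str.startswith l "Team:" = false)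
    (hP : PySem.Str.startswith l "Player:" = false) :
    pvGroupStep (gs ++ [(tag, rows)]) l = gs ++ [(tag, rows ++ [l])] := by
  simp only [pvGroupStep, hT, hP, Bool.false_eq_true, if_false,
    List.getLast?_concat, List.dropLast_concat]

lemma pvSgFold (lines : List String) : ∀ (gs : List (String × List String)) (tag : String)
    (rows : List String),
    lines.foldl pvGroupStep (gs ++ [(tag, rows)]) = gs ++ pvSg lines tag rows := by
  intro gs tag rows
  induction lines generalizing gs tag rows with
  | nil => simp [pvSg]
  | cons l ls ih =>
    by_cases hT : PySem.Str.startswith l "Team:" = true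
    · have : pvGroupStep (gs ++ [(tag, rows)]) l = (gs ++ [(tag, rows)]) ++ [("team", [])] := by
        simp only [pvGroupStep, hT, if_true]
      simp only [List.foldl_cons, this, ih, pvSg, hT, if_true]
      simp
    · by_cases hP : PySem.Str.startswith l "Player:" = true
      · have : pvGroupStep (gs ++ [(tag, rows)]) l = (gs ++ [(tag, rows)]) ++ [("player", [])] := by
          simp only [pvGroupStep, hT, hP, Bool.false_eq_true, if_false, if_true]
        simp only [List.foldl_cons, this, ih, pvSg, hT, hP, Bool.false_eq_true, if_false, if_true]
        simp
      · simp only [List.foldl_cons,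
          pvGroupStepConcat gs tag rows l (by simpa using hT) (by simpa using hP), ih,
          pvSg, hT, hP, Bool.false_eq_true, if_false]

lemma pvHdr_nil (lab : String) : pvHdr lab [] = none := rfl
lemma pvHdr_cons (lab r : String) (rs : List String) :
    pvHdr lab (r :: rs) = some (pvFix lab (pvCellsB r)) := rfl
lemma pvDest_nil (lab : String) (d : List (List (String × String))) : pvDest lab [] d = d := rfl
lemma pvDest_cons (lab r : String) (rs : List String) (d : List (List (String × String))) :
    pvDest lab (r :: rs) d = rs.foldl (pvRowStepB (pvFix lab (pvCellsB r))) d := rfl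

lemma pvPG_team (t p : List (List (String × String))) (rows : List String) :
    pvProcessGroup (t, p) ("team", rows) = (pvDest "Team" rows t, p) := by
  cases rows <;> simp [pvProcessGroup, pvDest, pvFix]

lemma pvPG_player (t p : List (List (String × String))) (rows : List String) :
    pvProcessGroup (t, p) ("player", rows) = (t, pvDest "Player" rows p) := by
  cases rows <;> simp [pvProcessGroup, pvDest, pvFix]

lemma pvStepMarkerTeam (ls : List String) (l : String) (sect : Option String)
    (hdr : Option (List String)) (t p : List (List (String × String)))
    (hT : PySem.Str.startswith l "Team:" = true) :
    pvLoopA (l :: ls) sect hdr t p = pvLoopA ls (some "team") none t p := by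
  simp only [pvLoopA, hT, if_true]

lemma pvStepMarkerPlayer (ls : List String) (l : String) (sect : Option String)
    (hdr : Option (List String)) (t p : List (List (String × String)))
    (hT : PySem.Str.startswith l "Team:" = false)
    (hP : PySem.Str.startswith l "Player:" = true) :
    pvLoopA (l :: ls) sect hdr t p = pvLoopA ls (some "player") none t p := by
  simp only [pvLoopA, hT, hP, Bool.false_eq_true, if_false, if_true]

lemma pvStepTeamNone (ls : List String) (l : String) (t p : List (List (String × String)))
    (hT : PySem.Str.startswith l "Team:" = false)
    (hP : PySem.Str.startswith l "Player:" = false) :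
    pvLoopA (l :: ls) (some "team") none t p
      = pvLoopA ls (some "team") (some (pvFix "Team" (pvCellsB l))) t p := by
  simp only [pvLoopA, hT, hP, Bool.false_eq_true, if_false, pvFix, ← pvCellsAB]
  simp

lemma pvStepPlayerNone (ls : List String) (l : String) (t p : List (List (String × String)))
    (hT : PySem.Str.startswith l "Team:" = false)
    (hP : PySem.Str.startswith l "Player:" = false) :
    pvLoopA (l :: ls) (some "player") none t p
      = pvLoopA ls (some "player") (some (pvFix "Player" (pvCellsB l))) t p := by
  simp only [pvLoopA, hT, hP, Bool.false_eq_true, if_false, pvFix, ← pvCellsAB]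
  simp

lemma pvStepTeam (ls : List String) (l : String) (h : List String)
    (t p : List (List (String × String)))
    (hT : PySem.Str.startswith l "Team:" = false)
    (hP : PySem.Str.startswith l "Player:" = false) :
    pvLoopA (l :: ls) (some "team") (some h) t p
      = pvLoopA ls (some "team") (some h) (pvRowStepB h t l) p := by
  simp only [pvLoopA, hT, hP, Bool.false_eq_true, if_false, reduceIte,
    Option.some.injEq, ← pvStepEq h t l]
  by_cases hc : pvCellsA l ≠ [] ∧ (pvCellsA l).head? ≠ some "" <;> simp [hc]

lemma pvStepPlayer (ls : List String) (l : String) (h : List String)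
    (t p : List (List (String × String)))
    (hT : PySem.Str.startswith l "Team:" = false)
    (hP : PySem.Str.startswith l "Player:" = false) :
    pvLoopA (l :: ls) (some "player") (some h) t p
      = pvLoopA ls (some "player") (some h) t (pvRowStepB h p l) := by
  simp only [pvLoopA, hT, hP, Bool.false_eq_true, if_false, reduceIte,
    Option.some.injEq, ← pvStepEq h p l]
  by_cases hc : pvCellsA l ≠ [] ∧ (pvCellsA l).head? ≠ some "" <;> simp [hc]

lemma pvMain (lines : List String) : ∀ (tag : String) (rows : List String)
    (t p : List (List (String × String))), (tag = "team" ∨ tag = "player") →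
    pvLoopA lines (some tag) (pvHdr (if tag = "team" then "Team" else "Player") rows)
      (if tag = "team" then pvDest "Team" rows t else t)
      (if tag = "team" then p else pvDest "Player" rows p)
    = (pvSg lines tag rows).foldl pvProcessGroup (t, p) := by
  induction lines with
  | nil =>
    intro tag rows t p htag
    rcases htag with h | h <;> subst h
    · simp only [String.reduceEq, reduceIte, pvSg, List.foldl_cons, List.foldl_nil, pvPG_team, pvLoopA]
    · simp only [String.reduceEq, reduceIte, pvSg, List.foldl_cons, List.foldl_nil, pvPG_player, pvLoopA]
  | cons l ls ih =>
    intro tag rows t p htag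
    by_cases hT : PySem.Str.startswith l "Team:" = true
    · have hsg : pvSg (l :: ls) tag rows = (tag, rows) :: pvSg ls "team" [] := by
        simp only [pvSg, hT, if_true]
      rcases htag with h | h <;> subst h <;>
        simp only [String.reduceEq, reduceIte] <;>
        rw [hsg, List.foldl_cons, pvStepMarkerTeam _ _ _ _ _ _ hT]
      · rw [pvPG_team]
        have hih := ih "team" [] (pvDest "Team" rows t) p (Or.inl rfl)
        simp only [String.reduceEq, reduceIte, pvHdr_nil, pvDest_nil] at hih
        exact hih
      · rw [pvPG_player]
        have hih := ih "team" [] t (pvDest "Player" rows p) (Or.inl rfl)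
        simp only [String.reduceEq, reduceIte, pvHdr_nil, pvDest_nil] at hih
        exact hih
    · by_cases hP : PySem.Str.startswith l "Player:" = true
      · have hT' : PySem.Str.startswith l "Team:" = false := by simpa using hT
        have hsg : pvSg (l :: ls) tag rows = (tag, rows) :: pvSg ls "player" [] := by
          simp only [pvSg, hT', hP, Bool.false_eq_true, if_false, if_true]
        rcases htag with h | h <;> subst h <;>
          simp only [String.reduceEq, reduceIte] <;>
          rw [hsg, List.foldl_cons, pvStepMarkerPlayer _ _ _ _ _ _ hT' hP]
        · rw [pvPG_team]
          have hih := ih "player" [] (pvDest "Team" rows t) p (Or.inr rfl)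
          simp only [String.reduceEq, reduceIte, pvHdr_nil, pvDest_nil] at hih
          exact hih
        · rw [pvPG_player]
          have hih := ih "player" [] t (pvDest "Player" rows p) (Or.inr rfl)
          simp only [String.reduceEq, reduceIte, pvHdr_nil, pvDest_nil] at hih
          exact hih
      · have hT' : PySem.Str.startswith l "Team:" = false := by simpa using hT
        have hP' : PySem.Str.startswith l "Player:" = false := by simpa using hP
        have hsg : pvSg (l :: ls) tag rows = pvSg ls tag (rows ++ [l]) := by
          simp only [pvSg, hT', hP', Bool.false_eq_true, if_false]
        rw [hsg]
        rcases htag with h | h <;> subst h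
        · simp only [String.reduceEq, reduceIte]
          cases rows with
          | nil =>
            have hih := ih "team" [l] t p (Or.inl rfl)
            simp only [String.reduceEq, reduceIte, pvHdr_cons, pvDest_cons,
              List.foldl_nil] at hih
            rw [List.nil_append, ← hih, pvHdr_nil, pvDest_nil]
            exact pvStepTeamNone ls l t p hT' hP'
          | cons r rs =>
            have hih := ih "team" ((r :: rs) ++ [l]) t p (Or.inl rfl)
            simp only [String.reduceEq, reduceIte, List.cons_append, pvHdr_cons, pvDest_cons,
              List.foldl_append, List.foldl_cons, List.foldl_nil] at hih
            simp only [List.cons_append]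
            rw [← hih, pvHdr_cons, pvDest_cons]
            exact pvStepTeam ls l _ _ p hT' hP'
        · simp only [String.reduceEq, reduceIte]
          cases rows with
          | nil =>
            have hih := ih "player" [l] t p (Or.inr rfl)
            simp only [String.reduceEq, reduceIte, pvHdr_cons, pvDest_cons,
              List.foldl_nil] at hih
            rw [List.nil_append, ← hih, pvHdr_nil, pvDest_nil]
            exact pvStepPlayerNone ls l t p hT' hP'
          | cons r rs =>
            have hih := ih "player" ((r :: rs) ++ [l]) t p (Or.inr rfl)
            simp only [String.reduceEq, reduceIte, List.cons_append, pvHdr_cons, pvDest_cons,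
              List.foldl_append, List.foldl_cons, List.foldl_nil] at hih
            simp only [List.cons_append]
            rw [← hih, pvHdr_cons, pvDest_cons]
            exact pvStepPlayer ls l _ t _ hT' hP'

lemma pvTop (lines : List String) : ∀ (t p : List (List (String × String))),
    pvLoopA lines none none t p = (lines.foldl pvGroupStep []).foldl pvProcessGroup (t, p) := by
  induction lines with
  | nil => intro t p; simp [pvLoopA]
  | cons l ls ih =>
    intro t p
    by_cases hT : PySem.Str.startswith l "Team:" = true
    · have hg : pvGroupStep [] l = [("team", [])] := by
        simp only [pvGroupStep, hT, if_true, List.nil_append]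
      have hsf : List.foldl pvGroupStep [("team", [])] ls = pvSg ls "team" [] := by
        simpa using pvSgFold ls [] "team" []
      have hm := pvMain ls "team" [] t p (Or.inl rfl)
      simp only [String.reduceEq, reduceIte, pvHdr_nil, pvDest_nil] at hm
      rw [pvStepMarkerTeam _ _ _ _ _ _ hT, List.foldl_cons, hg, hsf, ← hm]
    · by_cases hP : PySem.Str.startswith l "Player:" = true
      · have hT' : PySem.Str.startswith l "Team:" = false := by simpa using hT
        have hg : pvGroupStep [] l = [] ++ [("player", [])] := by
          simp only [pvGroupStep, hT', hP, Bool.false_eq_true, if_false, if_true]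
        have hm := pvMain ls "player" [] t p (Or.inr rfl)
        simp only [String.reduceEq, reduceIte, pvHdr_nil, pvDest_nil] at hm
        rw [pvStepMarkerPlayer _ _ _ _ _ _ hT' hP, List.foldl_cons, hg,
          pvSgFold ls [] "player" [], List.nil_append, ← hm]
      · have hT' : PySem.Str.startswith l "Team:" = false := by simpa using hT
        have hP' : PySem.Str.startswith l "Player:" = false := by simpa using hP
        have hg : pvGroupStep [] l = [] := by
          simp only [pvGroupStep, hT', hP', Bool.false_eq_true, if_false, List.getLast?_nil]
        have hstep : pvLoopA (l :: ls) none none t p = pvLoopA ls none none t p := by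
          simp only [pvLoopA, hT', hP', Bool.false_eq_true, if_false, reduceCtorEq, reduceIte,
            Option.some.injEq]
        rw [hstep, List.foldl_cons, hg, ih t p]

-- ===== VERDICT (by name: the statement is the Claim_ definition above) =====
theorem parse_table_block_spec : Claim_equal_parse_table_block := by
  intro block_text _
  unfold Spec_parse_table_block parse_table_block parse_table_block_alt
  have h := pvTop (pvLinesA block_text) [] []
  simp only [pvLinesA, pvLinesB] at *
  rw [h]
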